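-- pv_equiv track=rewrite | github.com/trannguyenhan/workspace-algorithms | TapConLienKePhiaTruoc.py | isFirstSub
-- ===== SOURCE A (Python) =====
-- def isFirstSub(A):
--     # Neu phan tu dau tien khac 1 -> sai
--     if(A[0] != 1) :
--         return False
--
--     lens = len(A)
--     dem = 0
--     for x in range(0,lens-1,1):
--         if(A[x]+1 == A[x+1]) :
--             dem = dem + 1
--
--     if(dem == lens-1) :
--         return True
--     else :
--         return False
-- ===== SOURCE B (Python) =====
-- def isFirstSub(A):
--     # Build the expected sequence 1..len(A) once and compare wholesale.
--     return A == list(range(1, len(A) + 1))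
-- ===== Notes on version B (the rewrite author's own statement) =====
-- stated objective: simpler
-- what changed: B builds the reference sequence list(range(1, len(A)+1)) once and compares it to A wholesale, instead of A's first-element guard plus an index loop counting consecutive +1 pairs and comparing the count to len(A)-1.
import Mathlib
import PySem

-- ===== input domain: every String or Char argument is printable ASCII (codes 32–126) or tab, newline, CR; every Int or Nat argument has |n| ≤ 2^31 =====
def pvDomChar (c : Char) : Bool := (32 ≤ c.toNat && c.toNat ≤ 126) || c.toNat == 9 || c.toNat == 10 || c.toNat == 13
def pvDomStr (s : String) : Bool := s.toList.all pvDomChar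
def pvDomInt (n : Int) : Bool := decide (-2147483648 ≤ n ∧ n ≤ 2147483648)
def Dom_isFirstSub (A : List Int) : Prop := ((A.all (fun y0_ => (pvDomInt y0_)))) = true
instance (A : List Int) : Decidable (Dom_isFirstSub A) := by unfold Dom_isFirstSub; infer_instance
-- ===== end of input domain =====

-- B replaces A's guard-plus-counting loop by building list(range(1, len(A)+1)) once and comparing it to A; return-value
-- equivalence only. A raises IndexError on the empty list (it reads the first element unconditionally); Pre_ excludes exactly that input.

-- ===== PORT A =====
def isFirstSub (A : List Int) : Bool :=
  match PySem.List.pyGet? A 0 with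
  | none => false  -- unreachable under Pre_isFirstSub (Python raises IndexError here)
  | some a0 =>
    if a0 ≠ 1 then false
    else
      let lens : Int := A.length
      let dem : Int := (PySem.List.pyRange 0 (lens - 1) 1).foldl
        (fun dem x => if PySem.List.pyGetD A x 0 + 1 = PySem.List.pyGetD A (x + 1) 0 then dem + 1 else dem) 0
      if dem = lens - 1 then true else false

-- ===== PORT B =====
def isFirstSub_alt (A : List Int) : Bool :=
  A = PySem.List.pyRange 1 ((A.length : Int) + 1) 1

-- ===== PRECONDITION & SPEC =====
-- A reads its first element unconditionally, so the empty list (IndexError) is excluded.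
def Pre_isFirstSub (A : List Int) : Prop := A ≠ []
instance (A : List Int) : Decidable (Pre_isFirstSub A) := by unfold Pre_isFirstSub; infer_instance
def pvWitness_isFirstSub : List Int := ([1, 2, 3])

def Spec_isFirstSub (A : List Int) (out : Bool) : Prop := out = isFirstSub_alt A
instance (A : List Int) (out : Bool) : Decidable (Spec_isFirstSub A out) := by unfold Spec_isFirstSub; infer_instance

-- ===== CLAIM (what is proved, stated in full; the proofs are below) =====
def Claim_equal_isFirstSub : Prop := ∀ (A : List Int), Dom_isFirstSub A → Pre_isFirstSub A → Spec_isFirstSub A (isFirstSub A)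
-- ===== LEMMAS AND PROOFS =====

-- all elements of A (a nonempty list with head 1 and consecutive +1 steps) are pinned down
lemma chain_getElem (A : List Int) (h0 : A ≠ []) (hhead : A[0]'(by simpa [List.length_pos_iff] using h0) = 1)
    (hstep : ∀ k : Nat, (hk : k + 1 < A.length) →
      A[k]'(by omega) + 1 = A[k + 1]'(by omega)) :
    ∀ k : Nat, (hk : k < A.length) → A[k] = (k : Int) + 1 := by
  intro k
  induction k with
  | zero => intro hk; simpa using hhead
  | succ m ih =>
    intro hk
    have := hstep m (by omega)
    have := ih (by omega)
    push_cast
    omega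

lemma countP_pairs (A : List Int) :
    (PySem.List.pyRange 0 ((A.length : Int) - 1) 1).countP
        (fun x => decide (PySem.List.pyGetD A x 0 + 1 = PySem.List.pyGetD A (x + 1) 0))
      = (PySem.List.pyRange 0 ((A.length : Int) - 1) 1).length ↔
    (∀ k : Nat, (hk : k + 1 < A.length) → A[k]'(by omega) + 1 = A[k + 1]'(by omega)) := by
  rw [List.countP_eq_length]
  constructor
  · intro h k hk
    have hx : (k : Int) ∈ PySem.List.pyRange 0 ((A.length : Int) - 1) 1 := by
      rw [PySem.List.mem_pyRange_one]; constructor <;> [positivity; omega]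
    have := h _ hx
    rw [PySem.List.pyGetD_eq_getElem A 0 (by positivity) (by push_cast; omega),
        PySem.List.pyGetD_eq_getElem A 0 (by positivity) (by push_cast; omega)] at this
    simp only [decide_eq_true_eq] at this
    simpa [Int.toNat_natCast] using this
  · intro h x hx
    rw [PySem.List.mem_pyRange_one] at hx
    obtain ⟨h1, h2⟩ := hx
    rw [PySem.List.pyGetD_eq_getElem A 0 h1 (by omega),
        PySem.List.pyGetD_eq_getElem A 0 (by omega) (by omega)]
    have hk : x.toNat + 1 < A.length := by omega
    have := h x.toNat hk
    simp only [decide_eq_true_eq]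
    have hx1 : (x + 1).toNat = x.toNat + 1 := by omega
    simp only [hx1]
    exact this

lemma alt_iff (A : List Int) :
    isFirstSub_alt A = true ↔ ∀ k : Nat, (hk : k < A.length) → A[k] = (k : Int) + 1 := by
  simp only [isFirstSub_alt, decide_eq_true_eq]
  constructor
  · intro h k hk
    rw [List.getElem_of_eq h hk, PySem.List.getElem_pyRange_one]
    omega
  · intro h
    apply List.ext_getElem
    · rw [PySem.List.length_pyRange_one]; omega
    · intro k hk hk'
      rw [PySem.List.getElem_pyRange_one, h k hk]; omega

-- ===== VERDICT (by name: the statement is the Claim_ definition above) =====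
theorem isFirstSub_spec : Claim_equal_isFirstSub := by
  intro A _ hpre
  unfold Spec_isFirstSub
  have hlen : 0 < A.length := List.length_pos_iff.mpr hpre
  have hget : PySem.List.pyGet? A 0 = some (A[0]'hlen) := by
    simp [PySem.List.pyGet?, PySem.List.pyIdx?, hlen]
  have hfold := PySem.List.foldl_count_if
    (fun x => decide (PySem.List.pyGetD A x 0 + 1 = PySem.List.pyGetD A (x + 1) 0))
    (PySem.List.pyRange 0 ((A.length : Int) - 1) 1) 0
  simp only [decide_eq_true_eq] at hfold
  simp only [isFirstSub, hget, hfold, zero_add]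
  set c : Int := ((PySem.List.pyRange 0 ((A.length : Int) - 1) 1).countP
    (fun x => decide (PySem.List.pyGetD A x 0 + 1 = PySem.List.pyGetD A (x + 1) 0)) : Int) with hc
  have hlen' : ((PySem.List.pyRange 0 ((A.length : Int) - 1) 1).length : Int)
      = (A.length : Int) - 1 := by
    rw [PySem.List.length_pyRange_one]; omega
  by_cases hhead : A[0]'hlen = 1
  · by_cases hcnt : c = (A.length : Int) - 1
    · have heq : (PySem.List.pyRange 0 ((A.length : Int) - 1) 1).countP
          (fun x => decide (PySem.List.pyGetD A x 0 + 1 = PySem.List.pyGetD A (x + 1) 0))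
          = (PySem.List.pyRange 0 ((A.length : Int) - 1) 1).length := by omega
      have hstep := (countP_pairs A).mp heq
      have halt : isFirstSub_alt A = true :=
        (alt_iff A).mpr (chain_getElem A hpre hhead hstep)
      simp [hhead, hcnt, halt]
    · have halt : isFirstSub_alt A = false := by
        by_contra hne
        have htrue : isFirstSub_alt A = true := by
          revert hne; cases isFirstSub_alt A <;> simp
        have hall := (alt_iff A).mp htrue
        have hstep : ∀ k : Nat, (hk : k + 1 < A.length) →
            A[k]'(by omega) + 1 = A[k + 1]'(by omega) := by
          intro k hk
          have h1 := hall k (by omega)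
          have h2 := hall (k + 1) hk
          push_cast at h2; omega
        have := (countP_pairs A).mpr hstep
        omega
      simp [hhead, hcnt, halt]
  · have halt : isFirstSub_alt A = false := by
      by_contra hne
      have htrue : isFirstSub_alt A = true := by
        revert hne; cases isFirstSub_alt A <;> simp
      have := (alt_iff A).mp htrue 0 hlen
      simp at this; omega
    simp [hhead, halt]
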